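-- pv_equiv track=rewrite | github.com/GuoBioinfoLab/DeRR | DeRR.py | SegmentFromCigar
-- ===== SOURCE A (Python) =====
-- def SegmentFromCigar( cigartuples  ):
--     start = 0
--     end = 0
--     pos = 0
--     flag = True
--     for it in cigartuples:
--         if flag and it[0] == 0:
--             start = pos
--             flag = False
--         pos = pos + it[1]
--         if it[0] == 0:
--             end = pos
--     return start,end
-- ===== SOURCE B (Python) =====
-- def SegmentFromCigar(cigartuples):
--     idxs = [i for i, it in enumerate(cigartuples) if it[0] == 0]
--     if not idxs:
--         return 0, 0
--     start = sum(it[1] for it in cigartuples[:idxs[0]])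
--     end = sum(it[1] for it in cigartuples[:idxs[-1] + 1])
--     return start, end
-- ===== Notes on version B (the rewrite author's own statement) =====
-- stated objective: alternative
-- what changed: Replaces the single stateful loop with start/end/pos/flag variables by first collecting the match indices with a comprehension and then summing length prefixes up to the first and through the last match index.
import Mathlib
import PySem

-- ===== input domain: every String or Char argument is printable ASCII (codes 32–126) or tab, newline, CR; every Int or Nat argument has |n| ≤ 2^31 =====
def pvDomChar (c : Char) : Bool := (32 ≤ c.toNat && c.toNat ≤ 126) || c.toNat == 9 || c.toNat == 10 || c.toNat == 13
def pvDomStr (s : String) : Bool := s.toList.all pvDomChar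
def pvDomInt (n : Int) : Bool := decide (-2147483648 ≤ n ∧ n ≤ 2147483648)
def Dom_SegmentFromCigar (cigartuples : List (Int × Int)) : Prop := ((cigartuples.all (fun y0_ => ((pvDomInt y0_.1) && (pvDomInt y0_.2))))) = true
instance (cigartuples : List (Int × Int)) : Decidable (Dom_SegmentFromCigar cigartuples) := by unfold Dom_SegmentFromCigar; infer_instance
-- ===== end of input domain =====

-- B replaces A's stateful single loop (start/end/pos/flag) by collecting the match-op indices
-- and summing length prefixes up to the first and through the last match (alternative decomposition, not faster).
-- ===== PORT A =====
-- Loop of A: state (start, end_, pos, flag), one branch per Python statement.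
def segLoopA : List (Int × Int) → Int → Int → Int → Bool → Int × Int
  | [], start, end_, _, _ => (start, end_)
  | it :: rest, start, end_, pos, flag =>
    let start' := if flag && (it.1 == 0) then pos else start
    let flag' := if flag && (it.1 == 0) then false else flag
    let pos' := pos + it.2
    let end' := if it.1 == 0 then pos' else end_
    segLoopA rest start' end' pos' flag'

def SegmentFromCigar (cigartuples : List (Int × Int)) : Int × Int :=
  segLoopA cigartuples 0 0 0 true

-- ===== PORT B =====
-- B: indices of match ops (enumerate + filter), then prefix-length sums.
def SegmentFromCigar_alt (cigartuples : List (Int × Int)) : Int × Int :=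
  let idxs := cigartuples.zipIdx.filterMap (fun p => if p.1.1 = 0 then some p.2 else none)
  match idxs.head?, idxs.getLast? with
  | some i, some j =>
      (((cigartuples.take i).map Prod.snd).sum, ((cigartuples.take (j + 1)).map Prod.snd).sum)
  | _, _ => (0, 0)

-- ===== PRECONDITION & SPEC =====
def Spec_SegmentFromCigar (cigartuples : List (Int × Int)) (out : Int × Int) : Prop := out = SegmentFromCigar_alt cigartuples
instance (cigartuples : List (Int × Int)) (out : Int × Int) : Decidable (Spec_SegmentFromCigar cigartuples out) := by unfold Spec_SegmentFromCigar; infer_instance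

-- ===== CLAIM (what is proved, stated in full; the proofs are below) =====
def Claim_equal_SegmentFromCigar : Prop := ∀ (cigartuples : List (Int × Int)), Dom_SegmentFromCigar cigartuples → Spec_SegmentFromCigar cigartuples (SegmentFromCigar cigartuples)

-- ===== LEMMAS AND PROOFS =====


-- Common characterisation: none = no match op; some (a, b) = (offset before first
-- match, offset through last match), both relative to the start of the list.
def seg? : List (Int × Int) → Option (Int × Int)
  | [] => none
  | it :: rest =>
    match seg? rest with
    | none => if it.1 = 0 then some (0, it.2) else none
    | some (s, e) => if it.1 = 0 then some (0, it.2 + e) else some (it.2 + s, it.2 + e)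

def idxsOf (xs : List (Int × Int)) (n : Nat) : List Nat :=
  (xs.zipIdx n).filterMap (fun p => if p.1.1 = 0 then some p.2 else none)

theorem idxsOf_cons (x : Int × Int) (xs : List (Int × Int)) (n : Nat) :
    idxsOf (x :: xs) n = if x.1 = 0 then n :: idxsOf xs (n + 1) else idxsOf xs (n + 1) := by
  simp only [idxsOf, List.zipIdx_cons, List.filterMap_cons]
  split <;> rename_i h <;> simp at h <;> simp [h]

theorem segLoopA_eq (xs : List (Int × Int)) : ∀ (p s e : Int),
    (segLoopA xs s e p true =
      match seg? xs with
      | none => (s, e)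
      | some (a, b) => (p + a, p + b)) ∧
    (segLoopA xs s e p false =
      (s, match seg? xs with
          | none => e
          | some (_, b) => p + b)) := by
  induction xs with
  | nil => intro p s e; simp [segLoopA, seg?]
  | cons x xs ih =>
    intro p s e
    by_cases hx : x.1 = 0
    · constructor
      · rw [show segLoopA (x :: xs) s e p true = segLoopA xs p (p + x.2) (p + x.2) false from by
          simp [segLoopA, hx]]
        rw [(ih (p + x.2) p (p + x.2)).2]
        rcases h : seg? xs with _ | ⟨a, b⟩ <;> simp [seg?, h, hx] <;> ring
      · rw [show segLoopA (x :: xs) s e p false = segLoopA xs s (p + x.2) (p + x.2) false from by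
          simp [segLoopA, hx]]
        rw [(ih (p + x.2) s (p + x.2)).2]
        rcases h : seg? xs with _ | ⟨a, b⟩ <;> simp [seg?, h, hx] <;> ring
    · constructor
      · rw [show segLoopA (x :: xs) s e p true = segLoopA xs s e (p + x.2) true from by
          simp [segLoopA, hx]]
        rw [(ih (p + x.2) s e).1]
        rcases h : seg? xs with _ | ⟨a, b⟩ <;> simp [seg?, h, hx] <;> constructor <;> ring
      · rw [show segLoopA (x :: xs) s e p false = segLoopA xs s e (p + x.2) false from by
          simp [segLoopA, hx]]
        rw [(ih (p + x.2) s e).2]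
        rcases h : seg? xs with _ | ⟨a, b⟩ <;> simp [seg?, h, hx] <;> ring

theorem idxsOf_spec (xs : List (Int × Int)) : ∀ (n : Nat),
    (seg? xs = none → idxsOf xs n = []) ∧
    (∀ a b, seg? xs = some (a, b) →
      ∃ i j : Nat, (idxsOf xs n).head? = some (i + n) ∧ (idxsOf xs n).getLast? = some (j + n) ∧
        ((xs.take i).map Prod.snd).sum = a ∧ ((xs.take (j + 1)).map Prod.snd).sum = b) := by
  induction xs with
  | nil => intro n; simp [idxsOf, seg?]
  | cons x xs ih =>
    intro n
    rw [idxsOf_cons]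
    rcases h : seg? xs with _ | ⟨a', b'⟩
    · have hnil := (ih (n + 1)).1 h
      by_cases hx : x.1 = 0
      · simp only [hx, if_true]
        refine ⟨fun hc => by simp [seg?, h, hx] at hc, fun a b hab => ?_⟩
        simp only [seg?, h, hx, if_true, Option.some.injEq, Prod.mk.injEq] at hab
        exact ⟨0, 0, by simp [hnil], by simp [hnil], by simp [hab.1], by simp [← hab.2]⟩
      · simp only [hx, if_false]
        refine ⟨fun _ => hnil, fun a b hab => ?_⟩
        simp [seg?, h, hx] at hab
    · obtain ⟨i, j, h1, h2, h3, h4⟩ := (ih (n + 1)).2 a' b' h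
      have hne : idxsOf xs (n + 1) ≠ [] := by
        intro hc; rw [hc] at h1; simp at h1
      by_cases hx : x.1 = 0
      · simp only [hx, if_true]
        refine ⟨fun hc => by simp [seg?, h, hx] at hc, fun a b hab => ?_⟩
        simp only [seg?, h, hx, if_true, Option.some.injEq, Prod.mk.injEq] at hab
        refine ⟨0, j + 1, by simp, ?_, by simp [← hab.1], ?_⟩
        · obtain ⟨y, ys, hl⟩ := List.exists_cons_of_ne_nil hne
          rw [hl, List.getLast?_cons_cons, ← hl, h2]
          congr 1; omega
        · simp only [List.take_succ_cons, List.map_cons, List.sum_cons, h4, ← hab.2]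
      · simp only [hx, if_false]
        refine ⟨fun hc => by simp [seg?, h, hx] at hc, fun a b hab => ?_⟩
        simp only [seg?, h, hx, if_false, Option.some.injEq, Prod.mk.injEq] at hab
        refine ⟨i + 1, j + 1, ?_, ?_, ?_, ?_⟩
        · rw [h1]; congr 1; omega
        · rw [h2]; congr 1; omega
        · simp only [List.take_succ_cons, List.map_cons, List.sum_cons, h3, ← hab.1]
        · simp only [List.take_succ_cons, List.map_cons, List.sum_cons, h4, ← hab.2]

theorem alt_eq (xs : List (Int × Int)) :
    SegmentFromCigar_alt xs = (match seg? xs with | none => (0, 0) | some v => v) := by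
  have h := idxsOf_spec xs 0
  have hid : xs.zipIdx.filterMap (fun p => if p.1.1 = 0 then some p.2 else none) = idxsOf xs 0 := rfl
  rcases hs : seg? xs with _ | ⟨a, b⟩
  · have hnil : idxsOf xs 0 = [] := h.1 hs
    simp only [SegmentFromCigar_alt, hid, hnil, List.head?_nil, List.getLast?_nil]
  · obtain ⟨i, j, h1, h2, h3, h4⟩ := h.2 a b hs
    simp only [Nat.add_zero] at h1 h2
    simp only [SegmentFromCigar_alt, hid, h1, h2, h3, h4]

-- ===== VERDICT (by name: the statement is the Claim_ definition above) =====
theorem SegmentFromCigar_spec : Claim_equal_SegmentFromCigar := by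
  intro xs _
  unfold Spec_SegmentFromCigar SegmentFromCigar
  rw [alt_eq, (segLoopA_eq xs 0 0 0).1]
  rcases seg? xs with _ | ⟨a, b⟩ <;> simp
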